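-- pv_equiv track=rewrite | github.com/walkccc/LeetCode | solutions/2593. Find Score of an Array After Marking All Elements/2593.py | findScore
-- ===== SOURCE A (Python) =====
-- def findScore(nums: list[int]) -> int:
--   ans = 0
--   seen = set()
--
--   for num, i in sorted([(num, i) for i, num in enumerate(nums)]):
--     if i in seen:
--       continue
--     seen.add(i - 1)
--     seen.add(i + 1)
--     seen.add(i)
--     ans += num
--
--   return ans
-- ===== SOURCE B (Python) =====
-- def findScore(nums: list[int]) -> int:
--   if not nums:
--     return 0
--   i = nums.index(min(nums))
--   return nums[i] + findScore(nums[:max(i - 1, 0)]) + findScore(nums[i + 2:])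
-- ===== Notes on version B (the rewrite author's own statement) =====
-- stated objective: alternative
-- what changed: Replaces A's sort-then-greedy with a marking set by a divide-and-conquer recursion: take the first occurrence of the global minimum and recurse independently on the sublist left of its left neighbor and the sublist right of its right neighbor; no sorting and no seen/marked structure.
import Mathlib
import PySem

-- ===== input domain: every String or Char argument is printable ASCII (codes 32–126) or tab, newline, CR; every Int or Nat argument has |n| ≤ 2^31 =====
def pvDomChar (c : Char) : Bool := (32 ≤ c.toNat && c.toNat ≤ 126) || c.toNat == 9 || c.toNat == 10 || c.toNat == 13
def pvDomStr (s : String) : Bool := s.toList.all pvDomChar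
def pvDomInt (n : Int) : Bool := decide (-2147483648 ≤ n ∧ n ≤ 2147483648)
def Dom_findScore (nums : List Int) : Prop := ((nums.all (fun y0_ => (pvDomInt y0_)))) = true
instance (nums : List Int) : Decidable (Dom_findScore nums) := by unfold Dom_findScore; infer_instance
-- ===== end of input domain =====

-- B replaces A's sort-then-greedy with a marking set by a divide-and-conquer recursion on the
-- first occurrence of the global minimum, recursing independently on the parts strictly left of
-- its left neighbor and strictly right of its right neighbor (alternative algorithm, same values).

-- ===== PORT A =====
def findScore (nums : List Int) : Int :=
  -- ans = 0; seen = set(); for num, i in sorted([(num, i) for i, num in enumerate(nums)]): …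
  (PySem.List.sorted2
      ((PySem.List.enumerate nums 0).map (fun p => (p.2, p.1)))
      (fun p => p.1) (fun p => p.2)).foldl
    (fun st p =>
      if PySem.Set.contains st.2 p.2 then st
      else (st.1 + p.1, PySem.Set.add (PySem.Set.add (PySem.Set.add st.2 (p.2 - 1)) (p.2 + 1)) p.2))
    (0, PySem.Set.empty)
  |>.1

-- ===== PORT B =====
-- termination helper: the chosen index is a valid position of nums
lemma pvAltIdx_lt (nums : List Int) (h : ¬ nums = []) :
    ((PySem.List.index? nums ((PySem.List.min? nums (fun x => x)).getD 0)).getD 0) < nums.length := by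
  have hm : (PySem.List.min? nums (fun x => x)).isSome := by
    cases hmm : PySem.List.min? nums (fun x => x) with
    | none => exact absurd ((PySem.List.min?_eq_none_iff _ _).mp hmm) h
    | some m => simp
  obtain ⟨m, hm⟩ := Option.isSome_iff_exists.mp hm
  have hmem : m ∈ nums := PySem.List.min?_mem hm
  have : (PySem.List.index? nums m).isSome := (PySem.List.index?_isSome_iff _ _).mpr hmem
  obtain ⟨k, hk⟩ := Option.isSome_iff_exists.mp this
  obtain ⟨hklt, -, -⟩ := PySem.List.getElem_of_index?_eq_some hk
  simp only [hm, Option.getD_some, hk]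
  exact hklt

def findScore_alt (nums : List Int) : Int :=
  if h : nums = [] then 0
  else
    -- i = nums.index(min(nums))
    let i : Nat := (PySem.List.index? nums ((PySem.List.min? nums (fun x => x)).getD 0)).getD 0
    -- nums[i] + findScore(nums[:max(i - 1, 0)]) + findScore(nums[i + 2:])
    PySem.List.pyGetD nums (i : Int) 0
      + findScore_alt (PySem.List.slice nums none (some (max ((i : Int) - 1) 0)))
      + findScore_alt (PySem.List.slice nums (some ((i : Int) + 2)) none)
termination_by nums.length
decreasing_by
  · have hi := pvAltIdx_lt nums h
    have hlen : 0 < nums.length := List.length_pos_iff.mpr h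
    rw [PySem.List.slice_to _ (le_max_right _ _)]
    simp only [List.length_take]
    omega
  · have hi := pvAltIdx_lt nums h
    have hlen : 0 < nums.length := List.length_pos_iff.mpr h
    rw [PySem.List.slice_from _ (by positivity)]
    simp only [List.length_drop]
    omega

-- ===== PRECONDITION & SPEC =====
def Spec_findScore (nums : List Int) (out : Int) : Prop := out = findScore_alt nums
instance (nums : List Int) (out : Int) : Decidable (Spec_findScore nums out) := by unfold Spec_findScore; infer_instance

-- ===== CLAIM (what is proved, stated in full; the proofs are below) =====
def Claim_equal_findScore : Prop := ∀ (nums : List Int), Dom_findScore nums → Spec_findScore nums (findScore nums)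

-- ===== LEMMAS AND PROOFS =====

-- lexicographic strict order on (value, index) pairs: Python's tuple '<'
def pvLL (p q : Int × Int) : Prop := p.1 < q.1 ∨ (p.1 = q.1 ∧ p.2 < q.2)


-- A's greedy loop abstracted over the processing list and the blocked-set membership function
def pvG : List (Int × Int) → (Int → Bool) → Int
  | [], _ => 0
  | (v, j) :: t, S =>
      if S j then pvG t S
      else v + pvG t (fun x => x == j - 1 || x == j + 1 || x == j || S x)

-- the (value, index) pairs of a list, in index order
def pvPairs (s : List Int) : List (Int × Int) :=
  (PySem.List.pyRange 0 (s.length : Int) 1).map (fun j => (PySem.List.pyGetD s j 0, j))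

lemma pvLL_asymm (p q : Int × Int) (h1 : pvLL p q) (h2 : pvLL q p) : False := by
  unfold pvLL at *; omega


lemma pairwise_insertBy (x : Int × Int) (l : List (Int × Int))
    (h : l.Pairwise (fun p q => ¬ pvLL q p)) :
    (PySem.List.insertBy
        (fun p q => decide (p.1 < q.1) || !decide (q.1 < p.1) && decide (p.2 < q.2)) x l).Pairwise
      (fun p q => ¬ pvLL q p) := by
  induction l with
  | nil => simp [PySem.List.insertBy]
  | cons y t ih =>
    simp only [PySem.List.insertBy]
    by_cases hb : (decide (x.1 < y.1) || !decide (y.1 < x.1) && decide (x.2 < y.2)) = true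
    · simp only [hb, if_true]
      have hxy : pvLL x y := by unfold pvLL; simp at hb; omega
      constructor
      · intro z hz
        rcases List.mem_cons.mp hz with rfl | hzt
        · exact fun hLL => pvLL_asymm _ _ hxy hLL
        · have hyz : ¬ pvLL z y := (List.pairwise_cons.mp h).1 z hzt
          intro hzx
          refine hyz ?_
          unfold pvLL at *; omega
      · exact h
    · simp only [hb, if_false]
      have hnxy : ¬ pvLL x y := by
        intro hLL; apply hb; unfold pvLL at hLL; simp; omega
      constructor
      · intro z hz
        rcases (PySem.List.mem_insertBy _ _ _ _).mp hz with rfl | hzt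
        · exact hnxy
        · exact (List.pairwise_cons.mp h).1 z hzt
      · exact ih (List.pairwise_cons.mp h).2
lemma sorted2_pairwise' (xs : List (Int × Int)) :
    (PySem.List.sorted2 xs (fun p => p.1) (fun p => p.2)).Pairwise (fun p q => ¬ pvLL q p) := by
  have key : ∀ (l acc : List (Int × Int)),
      acc.Pairwise (fun p q => ¬ pvLL q p) →
      (l.foldl (fun acc x => PySem.List.insertBy
        (fun p q => decide (p.1 < q.1) || !decide (q.1 < p.1) && decide (p.2 < q.2)) x acc) acc
        ).Pairwise (fun p q => ¬ pvLL q p) := by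
    intro l
    induction l with
    | nil => intro acc h; exact h
    | cons x t ih =>
      intro acc h
      exact ih _ (pairwise_insertBy x acc h)
  exact key xs [] (by simp)
lemma pvSorted2_pairwise_LL (xs : List (Int × Int)) (hnd : (xs.map Prod.snd).Nodup) :
    (PySem.List.sorted2 xs (fun p => p.1) (fun p => p.2)).Pairwise pvLL := by
  have hLperm : (PySem.List.sorted2 xs (fun p => p.1) (fun p => p.2)).Perm xs :=
    PySem.List.sorted2_perm xs _ _ false
  have hpw := sorted2_pairwise' xs
  have hndL : ((PySem.List.sorted2 xs (fun p => p.1) (fun p => p.2)).map Prod.snd).Nodup :=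
    (hLperm.map Prod.snd).nodup_iff.mpr hnd
  have hne : (PySem.List.sorted2 xs (fun p => p.1) (fun p => p.2)).Pairwise
      (fun p q => p.2 ≠ q.2) := (List.pairwise_map.mp hndL)
  refine (hpw.and hne).imp ?_
  rintro p q ⟨h1, h2⟩
  unfold pvLL at *
  omega

lemma pvSorted2_eq (xs ys : List (Int × Int)) (hperm : ys.Perm xs)
    (hnd : (xs.map Prod.snd).Nodup) (hp : ys.Pairwise pvLL) :
    PySem.List.sorted2 xs (fun p => p.1) (fun p => p.2) = ys := by
  have hLperm : (PySem.List.sorted2 xs (fun p => p.1) (fun p => p.2)).Perm xs :=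
    PySem.List.sorted2_perm xs _ _ false
  exact List.Perm.eq_of_pairwise
    (fun a b _ _ h1 h2 => absurd h2 (fun h2 => pvLL_asymm _ _ h1 h2))
    (pvSorted2_pairwise_LL xs hnd) hp (hLperm.trans hperm.symm)

lemma pvContains_add (s : PySem.Set Int) (a x : Int) :
    PySem.Set.contains (PySem.Set.add s a) x = (x == a || PySem.Set.contains s x) := by
  refine Bool.eq_iff_iff.mpr ?_
  simp [PySem.Set.contains_iff, PySem.Set.mem_add]
  tauto

lemma pvG_congr (l : List (Int × Int)) : ∀ (S S' : Int → Bool),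
    (∀ p ∈ l, S p.2 = S' p.2) → pvG l S = pvG l S' := by
  induction l with
  | nil => intro S S' _; rfl
  | cons p t ih =>
    intro S S' h
    obtain ⟨v, j⟩ := p
    have hj : S j = S' j := h (v, j) (by simp)
    simp only [pvG, hj]
    by_cases hb : S' j = true
    · simp only [hb, if_true]
      exact ih S S' (fun q hq => h q (by simp [hq]))
    · simp only [hb, if_false]
      exact congrArg (v + ·) (ih _ _ (fun q hq => by simp only [h q (by simp [hq])]))
lemma pvA_loop (l : List (Int × Int)) : ∀ (ans : Int) (seen : PySem.Set Int),
    (l.foldl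
      (fun st p =>
        if PySem.Set.contains st.2 p.2 then st
        else (st.1 + p.1, PySem.Set.add (PySem.Set.add (PySem.Set.add st.2 (p.2 - 1)) (p.2 + 1)) p.2))
      (ans, seen)).1
    = ans + pvG l (fun x => PySem.Set.contains seen x) := by
  induction l with
  | nil => intro ans seen; simp [pvG]
  | cons p t ih =>
    intro ans seen
    obtain ⟨v, j⟩ := p
    simp only [List.foldl_cons, pvG]
    by_cases hc : PySem.Set.contains seen j = true
    · simp only [hc, if_true]
      exact ih ans seen
    · simp only [hc, if_false, Bool.false_eq_true]
      rw [ih]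
      rw [add_assoc]
      congr 1
      refine congrArg (v + ·) ?_
      refine pvG_congr _ _ _ (fun q hq => ?_)
      simp only [pvContains_add]
      cases hS : PySem.Set.contains seen q.2 <;>
        cases h1 : (q.2 == j - 1) <;> cases h2 : (q.2 == j + 1) <;> cases h3 : (q.2 == j) <;> simp
lemma pvG_erase (x : Int) (l : List (Int × Int)) : ∀ (S : Int → Bool), S x = true →
    pvG l S = pvG (l.filter (fun p => !(p.2 == x))) S := by
  induction l with
  | nil => intro S _; rfl
  | cons p t ih =>
    intro S hS
    obtain ⟨v, j⟩ := p
    by_cases hj : j = x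
    · subst hj
      simp only [List.filter_cons, beq_self_eq_true, Bool.not_true, if_false, pvG, hS,
        Bool.false_eq_true, reduceIte]
      exact ih S hS
    · have : (!(j == x)) = true := by simp [hj]
      simp only [List.filter_cons, this, if_true, pvG]
      by_cases hb : S j = true
      · simp only [hb, if_true]; exact ih S hS
      · simp only [hb, if_false]
        exact congrArg (v + ·) (ih _ (by simp [hS]))
lemma pvG_split (i : Int) (l : List (Int × Int)) : ∀ (S SP SQ : Int → Bool),
    (∀ p ∈ l, p.2 ≠ i) →
    (∀ x, x < i → SP x = S x) → (∀ x, i < x → SQ x = S x) →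
    pvG l S
      = pvG (l.filter (fun p => decide (p.2 < i))) SP
        + pvG (l.filter (fun p => decide (i < p.2))) SQ := by
  induction l with
  | nil => intro S SP SQ _ _ _; simp [pvG]
  | cons p t ih =>
    intro S SP SQ hne hSP hSQ
    obtain ⟨v, j⟩ := p
    have hji : j ≠ i := hne (v, j) (by simp)
    have hne' : ∀ p ∈ t, p.2 ≠ i := fun p hp => hne p (by simp [hp])
    rcases lt_or_gt_of_ne hji with hj | hj
    · -- j < i: head goes to the left part
      have hfl : decide (j < i) = true := by simpa using hj
      have hfr : decide (i < j) = true → False := by simp; omega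
      simp only [List.filter_cons, hfl, if_true, decide_eq_true_eq]
      rw [if_neg (by omega)]
      simp only [pvG, hSP j hj]
      by_cases hb : S j = true
      · simp only [hb, if_true]
        exact ih S SP SQ hne' hSP hSQ
      · simp only [hb, Bool.false_eq_true, if_false]
        rw [add_assoc]
        refine congrArg (v + ·) ?_
        refine ih _ _ _ hne' ?_ ?_
        · intro x hx; rw [hSP x hx]
        · intro x hx
          have h1 : (x == j - 1) = false := by simp; omega
          have h2 : (x == j + 1) = false := by simp; omega
          have h3 : (x == j) = false := by simp; omega
          simp only [h1, h2, h3, Bool.false_or]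
          exact hSQ x hx
    · -- i < j: head goes to the right part
      have hfl : decide (i < j) = true := by simpa using hj
      simp only [List.filter_cons, hfl, if_true, decide_eq_true_eq]
      rw [if_neg (by omega)]
      simp only [pvG, hSQ j hj]
      by_cases hb : S j = true
      · simp only [hb, if_true]
        exact ih S SP SQ hne' hSP hSQ
      · simp only [hb, Bool.false_eq_true, if_false]
        rw [show pvG (List.filter (fun p => decide (p.2 < i)) t) SP
              + (v + pvG (List.filter (fun p => decide (i < p.2)) t)
                  (fun x => x == j - 1 || x == j + 1 || x == j || SQ x))
            = v + (pvG (List.filter (fun p => decide (p.2 < i)) t) SP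
              + pvG (List.filter (fun p => decide (i < p.2)) t)
                  (fun x => x == j - 1 || x == j + 1 || x == j || SQ x)) by ring]
        refine congrArg (v + ·) ?_
        refine ih _ _ _ hne' ?_ ?_
        · intro x hx
          have h1 : (x == j - 1) = false := by simp; omega
          have h2 : (x == j + 1) = false := by simp; omega
          have h3 : (x == j) = false := by simp; omega
          simp only [h1, h2, h3, Bool.false_or]
          exact hSP x hx
        · intro x hx; rw [hSQ x hx]
lemma pvG_shift (c : Int) (l : List (Int × Int)) : ∀ (S : Int → Bool),
    pvG l S = pvG (l.map (fun p => (p.1, p.2 - c))) (fun x => S (x + c)) := by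
  induction l with
  | nil => intro S; rfl
  | cons p t ih =>
    intro S
    obtain ⟨v, j⟩ := p
    simp only [List.map_cons, pvG, sub_add_cancel]
    by_cases hb : S j = true
    · simp only [hb, if_true]; exact ih S
    · simp only [hb, if_false]
      refine congrArg (v + ·) ?_
      rw [ih]
      refine pvG_congr _ _ _ (fun q hq => ?_)
      cases hS : S (q.2 + c) with
      | true => simp [hS]
      | false =>
        simp only [hS, Bool.or_false]
        refine Bool.eq_iff_iff.mpr ?_
        simp only [Bool.or_eq_true, beq_iff_eq]
        omega
lemma pvIndex?_eq_some_of (s : List Int) (k : Nat) (v : Int) (hk : k < s.length)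
    (hv : s[k] = v) (hfirst : ∀ j (_ : j < k), s[j]'(by omega) ≠ v) :
    PySem.List.index? s v = some k := by
  refine (PySem.List.index?_eq_some_iff _ _ _).mpr ?_
  refine ⟨s.take k, s.drop (k + 1), ?_, List.length_take_of_le (by omega), ?_⟩
  · conv_lhs => rw [← List.take_append_drop k s]
    rw [List.drop_eq_getElem_cons hk, hv]
  · intro hmem
    obtain ⟨j, hj, hje⟩ := List.mem_iff_getElem.mp hmem
    rw [List.length_take] at hj
    have hj' : j < k := by omega
    rw [List.getElem_take] at hje
    exact hfirst j hj' hje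

lemma pvPairs_snd (s : List Int) :
    (pvPairs s).map Prod.snd = PySem.List.pyRange 0 (s.length : Int) 1 := by
  unfold pvPairs
  rw [List.map_map]
  rw [show (Prod.snd ∘ fun j : Int => (PySem.List.pyGetD s j 0, j)) = (fun j : Int => j) from rfl]
  exact List.map_id' _

lemma pvPairs_snd_nodup (s : List Int) : ((pvPairs s).map Prod.snd).Nodup := by
  rw [pvPairs_snd]
  exact PySem.List.nodup_pyRange_one _ _

lemma pvPairs_length (s : List Int) : (pvPairs s).length = s.length := by
  unfold pvPairs
  rw [List.length_map, PySem.List.length_pyRange_one]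
  omega

lemma pvPairs_nil : pvPairs [] = [] := by
  unfold pvPairs
  simp [PySem.List.pyRange_one]

lemma pvPairs_mem (s : List Int) (p : Int × Int) (hp : p ∈ pvPairs s) :
    0 ≤ p.2 ∧ p.2 < (s.length : Int) ∧ p.1 = s.getD p.2.toNat 0 := by
  unfold pvPairs at hp
  obtain ⟨j, hj, rfl⟩ := List.mem_map.mp hp
  obtain ⟨hj0, hjn⟩ := PySem.List.mem_pyRange_one.mp hj
  refine ⟨hj0, hjn, ?_⟩
  rw [PySem.List.pyGetD_eq_getElem s 0 hj0 hjn]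
  rw [List.getD_eq_getElem _ _ (by omega)]

lemma pvPairs_getPair (s : List Int) (k : Nat) (hk : k < s.length) :
    (s.getD k 0, (k : Int)) ∈ pvPairs s := by
  unfold pvPairs
  refine List.mem_map.mpr ⟨(k : Int), ?_, ?_⟩
  · exact PySem.List.mem_pyRange_one.mpr ⟨by positivity, by exact_mod_cast hk⟩
  · rw [PySem.List.pyGetD_eq_getElem s 0 (by positivity) (by exact_mod_cast hk)]
    rw [List.getD_eq_getElem _ _ (by simpa using hk)]
    simp

lemma pvPairs_filter_lt (s : List Int) (m : Int) (h0 : 0 ≤ m) (hm : m ≤ (s.length : Int)) :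
    (pvPairs s).filter (fun p => decide (p.2 < m)) = pvPairs (s.take m.toNat) := by
  unfold pvPairs
  rw [List.filter_map]
  rw [show ((fun (p : Int × Int) => decide (p.2 < m)) ∘ (fun j => (PySem.List.pyGetD s j 0, j)))
      = fun j => decide (j < m) from rfl]
  rw [PySem.List.pyRange_one_append 0 m (s.length : Int) h0 hm]
  rw [List.filter_append]
  rw [List.filter_eq_self.mpr (fun a ha => by
    simpa using (PySem.List.mem_pyRange_one.mp ha).2)]
  rw [List.filter_eq_nil_iff.mpr (fun a ha => by
    have := (PySem.List.mem_pyRange_one.mp ha).1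
    simp
    omega)]
  rw [List.append_nil]
  have hlen : (((s.take m.toNat).length : Nat) : Int) = m := by
    rw [List.length_take]
    omega
  rw [hlen]
  refine List.map_congr_left (fun j hj => ?_)
  obtain ⟨hj0, hjm⟩ := PySem.List.mem_pyRange_one.mp hj
  have hjt : j.toNat < (s.take m.toNat).length := by
    rw [List.length_take]
    omega
  rw [PySem.List.pyGetD_eq_getElem s 0 hj0 (by omega)]
  rw [PySem.List.pyGetD_eq_getElem _ 0 hj0 (by simp [List.length_take]; omega)]
  rw [List.getElem_take]

lemma pvPairs_filter_ge_shift (s : List Int) (c : Int) (h0 : 0 ≤ c) :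
    ((pvPairs s).filter (fun p => decide (c ≤ p.2))).map (fun p => (p.1, p.2 - c))
      = pvPairs (s.drop c.toNat) := by
  by_cases hc : c ≤ (s.length : Int)
  · unfold pvPairs
    rw [List.filter_map]
    rw [show ((fun (p : Int × Int) => decide (c ≤ p.2)) ∘ (fun j => (PySem.List.pyGetD s j 0, j)))
        = fun j => decide (c ≤ j) from rfl]
    rw [PySem.List.pyRange_one_append 0 c (s.length : Int) h0 hc]
    rw [List.filter_append]
    rw [List.filter_eq_nil_iff.mpr (fun a ha => by
      have := (PySem.List.mem_pyRange_one.mp ha).2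
      simp
      omega)]
    rw [List.filter_eq_self.mpr (fun a ha => by
      simpa using (PySem.List.mem_pyRange_one.mp ha).1)]
    rw [List.nil_append, List.map_map]
    have hlen : (((s.drop c.toNat).length : Nat) : Int) = (s.length : Int) - c := by
      rw [List.length_drop]
      omega
    rw [hlen]
    rw [PySem.List.pyRange_one c (s.length : Int), PySem.List.pyRange_one 0 ((s.length : Int) - c)]
    rw [List.map_map, List.map_map]
    rw [show ((s.length : Int) - c - 0) = ((s.length : Int) - c) by ring]
    refine List.map_congr_left (fun k hk => ?_)
    have hk' : k < ((s.length : Int) - c).toNat := List.mem_range.mp hk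
    have h1 : (0 : Int) ≤ c + (k : Int) := by omega
    have h2 : c + (k : Int) < (s.length : Int) := by omega
    have hkd : k < (s.drop c.toNat).length := by
      rw [List.length_drop]
      omega
    have hnn : (0 : Int) ≤ (k : Int) := by positivity
    have e1 : (c + (k : Int)).toNat = c.toNat + k := by omega
    simp only [Function.comp_apply, zero_add]
    rw [PySem.List.pyGetD_eq_getElem s 0 h1 h2,
        PySem.List.pyGetD_eq_getElem (s.drop c.toNat) 0 hnn (by exact_mod_cast hkd)]
    refine Prod.ext ?_ ?_
    · simp only [e1, Int.toNat_natCast]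
      rw [List.getElem_drop]
    · simp only []
      omega
  · have h1 : (pvPairs s).filter (fun p => decide (c ≤ p.2)) = [] :=
      List.filter_eq_nil_iff.mpr (fun p hp => by
        obtain ⟨-, h2, -⟩ := pvPairs_mem s p hp
        simp
        omega)
    have h2 : s.drop c.toNat = [] := by
      rw [List.drop_eq_nil_iff]
      omega
    rw [h1, h2, pvPairs_nil]
    simp

lemma pvMain (n : Nat) : ∀ (s : List Int), s.length ≤ n →
    pvG (PySem.List.sorted2 (pvPairs s) (fun p => p.1) (fun p => p.2)) (fun _ => false)
      = findScore_alt s := by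
  induction n with
  | zero =>
    intro s hlen
    have hs : s = [] := List.eq_nil_of_length_eq_zero (by omega)
    subst hs
    rw [pvPairs_nil, findScore_alt]
    simp
    rfl
  | succ N ih =>
    intro s hlen
    by_cases hs : s = []
    · subst hs
      rw [pvPairs_nil, findScore_alt]
      simp
      rfl
    -- s ≠ []: the sorted pair list is nonempty; its head is the lexicographically
    -- least (value, index) pair, i.e. the first occurrence of the minimum.
    have hperm : (PySem.List.sorted2 (pvPairs s) (fun p => p.1) (fun p => p.2)).Perm (pvPairs s) :=
      PySem.List.sorted2_perm _ _ _ false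
    have hLL := pvSorted2_pairwise_LL (pvPairs s) (pvPairs_snd_nodup s)
    have hndL : ((PySem.List.sorted2 (pvPairs s) (fun p => p.1) (fun p => p.2)).map Prod.snd).Nodup :=
      (hperm.map Prod.snd).nodup_iff.mpr (pvPairs_snd_nodup s)
    rcases hL : PySem.List.sorted2 (pvPairs s) (fun p => p.1) (fun p => p.2) with - | ⟨⟨v0, i0⟩, tl⟩
    · exfalso
      have := hperm.length_eq
      rw [hL, pvPairs_length] at this
      exact hs (List.eq_nil_of_length_eq_zero this.symm)
    rw [hL] at hperm hLL hndL
    have hhdmem : ((v0, i0) : Int × Int) ∈ pvPairs s := hperm.mem_iff.mp (by simp)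
    obtain ⟨hi00, hi0n, hv0⟩ := pvPairs_mem s _ hhdmem
    simp only at hi00 hi0n hv0
    have hi0nn : i0.toNat < s.length := by omega
    have hv0elem : s[i0.toNat]'hi0nn = v0 := by
      rw [hv0, List.getD_eq_getElem _ _ hi0nn]
    have htl_ne_i0 : ∀ p ∈ tl, p.2 ≠ i0 := by
      intro p hp hpe
      have h1 : i0 ∉ tl.map Prod.snd := (List.nodup_cons.mp hndL).1
      exact h1 (List.mem_map.mpr ⟨p, hp, hpe⟩)
    have hhd_lt : ∀ p ∈ tl, pvLL (v0, i0) p := (List.pairwise_cons.mp hLL).1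
    have hmem_iff : ∀ p : Int × Int, p ∈ pvPairs s ↔ p = (v0, i0) ∨ p ∈ tl := by
      intro p
      rw [← hperm.mem_iff]
      simp
    have hmin : ∀ k (hk : k < s.length), v0 ≤ s[k] := by
      intro k hk
      have hgd : s.getD k 0 = s[k] := List.getD_eq_getElem _ _ hk
      rcases (hmem_iff _).mp (pvPairs_getPair s k hk) with heq | hmem
      · rw [Prod.mk.injEq] at heq
        rw [← hgd, heq.1]
      · have := hhd_lt _ hmem
        unfold pvLL at this
        simp only at this
        omega
    have hfirst : ∀ k (hk : k < i0.toNat), s[k]'(by omega) ≠ v0 := by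
      intro k hk
      have hkn : k < s.length := by omega
      have hgd : s.getD k 0 = s[k] := List.getD_eq_getElem _ _ hkn
      rcases (hmem_iff _).mp (pvPairs_getPair s k hkn) with heq | hmem
      · rw [Prod.mk.injEq] at heq
        omega
      · have := hhd_lt _ hmem
        unfold pvLL at this
        simp only at this
        omega
    -- B's minimum and its first index
    have hv0mem : v0 ∈ s := by
      rw [← hv0elem]
      exact List.getElem_mem _
    rcases hmm : PySem.List.min? s (fun x => x) with - | m
    · exact absurd ((PySem.List.min?_eq_none_iff _ _).mp hmm) hs
    have hmv : m = v0 := by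
      obtain ⟨k, hk, hke⟩ := List.mem_iff_getElem.mp (PySem.List.min?_mem hmm)
      have h1 : v0 ≤ m := by
        rw [← hke]
        exact hmin k hk
      exact le_antisymm (PySem.List.min?_isMin hmm v0 hv0mem) h1
    rw [hmv] at hmm
    have hidx : PySem.List.index? s v0 = some i0.toNat :=
      pvIndex?_eq_some_of s i0.toNat v0 hi0nn hv0elem hfirst
    -- unfold B one step
    rw [findScore_alt]
    rw [dif_neg hs]
    simp only [hmm, Option.getD_some, hidx, Int.toNat_of_nonneg hi00]
    rw [PySem.List.slice_to s (le_max_right _ _), PySem.List.slice_from s (by omega)]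
    rw [PySem.List.pyGetD_eq_getElem s 0 hi00 hi0n, hv0elem]
    -- unfold A one step
    simp only [pvG, Bool.false_eq_true, if_false]
    -- split the remaining greedy into the two independent sides of i0
    rw [pvG_split i0 tl
        (fun x => x == i0 - 1 || x == i0 + 1 || x == i0 || false)
        (fun x => x == i0 - 1) (fun x => x == i0 + 1) htl_ne_i0
        (by
          intro x hx
          have h2 : (x == i0 + 1) = false := by simp; omega
          have h3 : (x == i0) = false := by simp; omega
          simp [h2, h3])
        (by
          intro x hx
          have h1 : (x == i0 - 1) = false := by simp; omega
          have h3 : (x == i0) = false := by simp; omega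
          simp [h1, h3])]
    -- membership facts for tl
    have htlmem : ∀ p ∈ tl, 0 ≤ p.2 ∧ p.2 < (s.length : Int) := by
      intro p hp
      have : p ∈ pvPairs s := (hmem_iff p).mpr (Or.inr hp)
      obtain ⟨a, b, -⟩ := pvPairs_mem s p this
      exact ⟨a, b⟩
    have htlpw : tl.Pairwise pvLL := (List.pairwise_cons.mp hLL).2
    -- LEFT part = B's recursion on s.take (max (i0-1) 0).toNat
    have eL : pvG (tl.filter (fun p => decide (p.2 < i0))) (fun x => x == i0 - 1)
        = findScore_alt (s.take (max (i0 - 1) 0).toNat) := by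
      rw [pvG_erase (i0 - 1) _ _ (by simp)]
      rw [List.filter_filter]
      rw [List.filter_congr (q := fun p => decide (p.2 < max (i0 - 1) 0)) (by
        intro p hp
        have h0 := (htlmem p hp).1
        refine Bool.eq_iff_iff.mpr ?_
        simp only [Bool.and_eq_true, Bool.not_eq_eq_eq_not, Bool.not_true, beq_eq_false_iff_ne,
          ne_eq, decide_eq_true_eq]
        omega)]
      rw [pvG_congr _ _ (fun _ => false) (by
        intro p hp
        have h0 := (htlmem p (List.mem_of_mem_filter hp)).1
        have h1 := List.of_mem_filter hp
        simp only [decide_eq_true_eq] at h1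
        simp
        omega)]
      have hfeq : tl.filter (fun p => decide (p.2 < max (i0 - 1) 0))
          = PySem.List.sorted2 (pvPairs (s.take (max (i0 - 1) 0).toNat))
              (fun p => p.1) (fun p => p.2) := by
        refine (pvSorted2_eq _ _ ?_ (pvPairs_snd_nodup _) ?_).symm
        · have h1 : tl.filter (fun p => decide (p.2 < max (i0 - 1) 0))
              = (((v0, i0) : Int × Int) :: tl).filter (fun p => decide (p.2 < max (i0 - 1) 0)) := by
            rw [List.filter_cons]
            rw [if_neg (by simp; omega)]
          rw [h1]
          refine ((hperm.filter _).trans ?_).symm.symm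
          rw [pvPairs_filter_lt s (max (i0 - 1) 0) (le_max_right _ _) (by omega)]
        · exact List.Pairwise.sublist List.filter_sublist htlpw
      rw [hfeq]
      refine ih _ ?_
      rw [List.length_take]
      omega
    -- RIGHT part = B's recursion on s.drop (i0+2).toNat
    have eR : pvG (tl.filter (fun p => decide (i0 < p.2))) (fun x => x == i0 + 1)
        = findScore_alt (s.drop (i0 + 2).toNat) := by
      rw [pvG_erase (i0 + 1) _ _ (by simp)]
      rw [List.filter_filter]
      rw [List.filter_congr (q := fun p => decide (i0 + 2 ≤ p.2)) (by
        intro p hp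
        refine Bool.eq_iff_iff.mpr ?_
        simp only [Bool.and_eq_true, Bool.not_eq_eq_eq_not, Bool.not_true, beq_eq_false_iff_ne,
          ne_eq, decide_eq_true_eq]
        omega)]
      rw [pvG_shift (i0 + 2)]
      rw [pvG_congr _ _ (fun _ => false) (by
        intro p hp
        obtain ⟨q, hq, rfl⟩ := List.mem_map.mp hp
        have h1 := List.of_mem_filter hq
        simp only [decide_eq_true_eq] at h1
        simp
        omega)]
      have hfeq : (tl.filter (fun p => decide (i0 + 2 ≤ p.2))).map (fun p => (p.1, p.2 - (i0 + 2)))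
          = PySem.List.sorted2 (pvPairs (s.drop (i0 + 2).toNat))
              (fun p => p.1) (fun p => p.2) := by
        refine (pvSorted2_eq _ _ ?_ (pvPairs_snd_nodup _) ?_).symm
        · have h1 : tl.filter (fun p => decide (i0 + 2 ≤ p.2))
              = (((v0, i0) : Int × Int) :: tl).filter (fun p => decide (i0 + 2 ≤ p.2)) := by
            rw [List.filter_cons]
            rw [if_neg (by simp)]
          rw [h1]
          refine ((hperm.filter _).map _).trans ?_
          rw [pvPairs_filter_ge_shift s (i0 + 2) (by omega)]
        · refine List.pairwise_map.mpr ?_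
          refine (List.Pairwise.sublist List.filter_sublist htlpw).imp ?_
          intro a b hab
          unfold pvLL at *
          simp only at *
          omega
      rw [hfeq]
      refine ih _ ?_
      rw [List.length_drop]
      omega
    rw [eL, eR]
    ring

-- ===== VERDICT (by name: the statement is the Claim_ definition above) =====
theorem findScore_spec : Claim_equal_findScore := by
  intro nums _
  unfold Spec_findScore findScore
  have hpairs : (PySem.List.enumerate nums 0).map (fun p => (p.2, p.1)) = pvPairs nums := by
    rw [PySem.List.enumerate_eq_map_pyRange nums 0, List.map_map]
    simp [pvPairs]
  rw [hpairs, pvA_loop]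
  rw [pvG_congr _ _ (fun _ => false) (by intro p _; simp [PySem.Set.empty, PySem.Set.contains])]
  simpa using pvMain nums.length nums le_rfl
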